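-- pv_equiv track=rewrite | github.com/travaj24/Lumenairy | lumenairy/lenses.py | _multi_indices_total_degree
-- ===== SOURCE A (Python) =====
-- def _multi_indices_total_degree(n_vars: int, max_order: int):
--     """Enumerate multi-indices k with sum(k) <= max_order, as list of tuples."""
--     out = []
--     def recurse(prefix, remaining, depth):
--         if depth == n_vars:
--             out.append(tuple(prefix))
--             return
--         for k in range(remaining + 1):
--             recurse(prefix + [k], remaining - k, depth + 1)
--     recurse([], max_order, 0)
--     return out
-- ===== SOURCE B (Python) =====
-- def _multi_indices_total_degree(n_vars: int, max_order: int):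
--     """Enumerate multi-indices k with sum(k) <= max_order, as list of tuples."""
--     work = [([], max_order)]
--     for _ in range(n_vars):
--         if not work:
--             break
--         work = [(prefix + [k], rem - k)
--                 for (prefix, rem) in work
--                 for k in range(rem + 1)]
--     return [tuple(prefix) for (prefix, _) in work]
-- ===== Notes on version B (the rewrite author's own statement) =====
-- stated objective: alternative
-- what changed: Replaces the depth-first nested recursion (closure appending to a shared list) with an iterative level-by-level accumulation: a worklist of (prefix, remaining) pairs is expanded once per coordinate and the prefixes are read off at the end.
-- outside the precondition, e.g. on _multi_indices_total_degree(-1, -2): A returns [], B returns [()]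
import Mathlib
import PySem

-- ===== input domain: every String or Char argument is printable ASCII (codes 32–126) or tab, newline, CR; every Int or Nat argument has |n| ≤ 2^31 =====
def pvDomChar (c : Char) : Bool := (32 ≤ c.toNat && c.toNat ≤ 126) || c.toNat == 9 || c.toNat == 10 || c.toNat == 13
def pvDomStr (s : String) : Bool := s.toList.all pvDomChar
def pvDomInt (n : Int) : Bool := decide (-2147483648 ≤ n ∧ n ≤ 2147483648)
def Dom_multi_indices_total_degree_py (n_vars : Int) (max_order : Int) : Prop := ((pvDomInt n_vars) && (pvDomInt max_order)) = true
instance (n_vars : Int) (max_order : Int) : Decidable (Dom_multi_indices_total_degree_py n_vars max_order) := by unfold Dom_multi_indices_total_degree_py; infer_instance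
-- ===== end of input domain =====

-- B replaces A's depth-first recursion with an iterative per-coordinate expansion of a worklist;
-- same output (return value only; A's tuples become lists), no speed claim.

-- ===== PORT A =====
-- recurse(prefix, remaining, depth): the pair (depth, n_vars) is encoded by the fuel
-- n_vars - depth (exact on Pre_, i.e. when n_vars ≥ 0: fuel = 0 ⟺ depth == n_vars).
def pyRecA : Nat → List Int → Int → List (List Int) → List (List Int)
  | 0, pfx, _, out => out ++ [pfx]
  | f+1, pfx, remaining, out =>
      (PySem.List.pyRange 0 (remaining + 1) 1).foldl
        (fun out k => pyRecA f (pfx ++ [k]) (remaining - k) out) out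

def multi_indices_total_degree_py (n_vars : Int) (max_order : Int) : List (List Int) :=
  pyRecA n_vars.toNat [] max_order []

-- ===== PORT B =====
-- one level of B's worklist rebuild: the double comprehension
def expandB (work : List (List Int × Int)) : List (List Int × Int) :=
  work.flatMap (fun pr => (PySem.List.pyRange 0 (pr.2 + 1) 1).map (fun k => (pr.1 ++ [k], pr.2 - k)))

-- 'for _ in range(n_vars): if not work: break; work = …' — the lazy range with break
-- is ported as fuel recursion that exits as soon as the worklist is empty
def loopB : Nat → List (List Int × Int) → List (List Int × Int)
  | 0, work => work
  | f+1, work => if work.isEmpty then work else loopB f (expandB work)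

def multi_indices_total_degree_py_alt (n_vars : Int) (max_order : Int) : List (List Int) :=
  (loopB n_vars.toNat [([], max_order)]).map Prod.fst

-- ===== PRECONDITION & SPEC =====
-- Pre_ excludes negative n_vars (outside the function's natural domain): there A raises
-- RecursionError when max_order ≥ 0, and when max_order < 0 it returns [] on a meaningless
-- query where B's [()] is equally defensible.
def Pre_multi_indices_total_degree_py (n_vars : Int) (max_order : Int) : Prop := 0 ≤ n_vars
instance (n_vars : Int) (max_order : Int) : Decidable (Pre_multi_indices_total_degree_py n_vars max_order) := by unfold Pre_multi_indices_total_degree_py; infer_instance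
def pvWitness_multi_indices_total_degree_py : Int × Int := (2, 3)

def Spec_multi_indices_total_degree_py (n_vars : Int) (max_order : Int) (out : List (List Int)) : Prop := out = multi_indices_total_degree_py_alt n_vars max_order
instance (n_vars : Int) (max_order : Int) (out : List (List Int)) : Decidable (Spec_multi_indices_total_degree_py n_vars max_order out) := by unfold Spec_multi_indices_total_degree_py; infer_instance

-- ===== CLAIM (what is proved, stated in full; the proofs are below) =====
def Claim_equal_multi_indices_total_degree_py : Prop := ∀ (n_vars : Int) (max_order : Int), Dom_multi_indices_total_degree_py n_vars max_order → Pre_multi_indices_total_degree_py n_vars max_order → Spec_multi_indices_total_degree_py n_vars max_order (multi_indices_total_degree_py n_vars max_order)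

-- ===== LEMMAS AND PROOFS =====

-- expandB iterated f times (proof-only helper)
def iterE : Nat → List (List Int × Int) → List (List Int × Int)
  | 0, w => w
  | f+1, w => iterE f (expandB w)

theorem expandB_append (a b : List (List Int × Int)) : expandB (a ++ b) = expandB a ++ expandB b := by
  simp [expandB]

theorem iterE_nil (f : Nat) : iterE f [] = [] := by
  induction f with
  | zero => rfl
  | succ f ih => simpa [iterE, expandB] using ih

theorem iterE_append (f : Nat) (a b : List (List Int × Int)) :
    iterE f (a ++ b) = iterE f a ++ iterE f b := by
  induction f generalizing a b with
  | zero => rfl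
  | succ f ih => simp [iterE, expandB_append, ih]

-- the key invariant: folding pyRecA at fuel f over a worklist appends exactly the prefixes
-- of the f-times-expanded worklist
theorem foldl_pyRecA (f : Nat) :
    ∀ (w : List (List Int × Int)) (out : List (List Int)),
      w.foldl (fun o pr => pyRecA f pr.1 pr.2 o) out = out ++ (iterE f w).map Prod.fst := by
  induction f with
  | zero =>
      intro w
      induction w with
      | nil => intro out; simp [iterE]
      | cons pr w ih => intro out; rw [List.foldl_cons, ih]; simp [iterE, pyRecA]
  | succ f ih =>
      have single : ∀ (p : List Int) (r : Int) (o : List (List Int)),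
          pyRecA (f+1) p r o = o ++ (iterE (f+1) [(p, r)]).map Prod.fst := by
        intro p r o
        have h := ih (((PySem.List.pyRange 0 (r + 1) 1)).map (fun k => (p ++ [k], r - k))) o
        rw [List.foldl_map] at h
        exact h.trans (by simp [iterE, expandB])
      intro w
      induction w with
      | nil => intro out; simp [iterE, expandB, iterE_nil]
      | cons pr w ihw =>
          intro out
          calc ((pr :: w).foldl (fun o p => pyRecA (f+1) p.1 p.2 o) out)
              = w.foldl (fun o p => pyRecA (f+1) p.1 p.2 o) (pyRecA (f+1) pr.1 pr.2 out) := rfl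
            _ = pyRecA (f+1) pr.1 pr.2 out ++ (iterE (f+1) w).map Prod.fst := ihw _
            _ = out ++ (iterE (f+1) [(pr.1, pr.2)]).map Prod.fst ++ (iterE (f+1) w).map Prod.fst := by
                  rw [single]
            _ = out ++ (iterE (f+1) (pr :: w)).map Prod.fst := by
                  rw [show pr :: w = [(pr.1, pr.2)] ++ w by simp, iterE_append]
                  simp

theorem loopB_eq_iterE (f : Nat) : ∀ w, loopB f w = iterE f w := by
  induction f with
  | zero => intro w; rfl
  | succ f ih =>
      intro w
      by_cases h : w = []
      · subst h; simpa [loopB, iterE, expandB] using (iterE_nil f).symm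
      · have h' : w.isEmpty = false := by simpa [List.isEmpty_iff] using h
        simp [loopB, iterE, h', ih]

-- ===== VERDICT (by name: the statement is the Claim_ definition above) =====
theorem multi_indices_total_degree_py_spec : Claim_equal_multi_indices_total_degree_py := by
  intro n_vars max_order _ hpre
  unfold Spec_multi_indices_total_degree_py multi_indices_total_degree_py multi_indices_total_degree_py_alt
  have hA : pyRecA n_vars.toNat [] max_order []
      = ([] : List (List Int)) ++ (iterE n_vars.toNat [([], max_order)]).map Prod.fst := by
    have := foldl_pyRecA n_vars.toNat [([], max_order)] []
    simpa using this
  rw [hA, loopB_eq_iterE]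
  simp
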